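-- pv_equiv track=rewrite | github.com/wxy2ab/akinterpreter | core/akshare_doc/akshare_process_docs.py | truncate_functions
-- ===== SOURCE A (Python) =====
-- def truncate_functions(functions, max_length=28000):
--     """截断函数列表，确保总字符数不超过max_length"""
--     total_length = 0
--     truncated_functions = []
--     for func in functions:
--         if total_length + len(func) + 1 > max_length:
--             break
--         truncated_functions.append(func)
--         total_length += len(func) + 1  # +1 for newline
--     return truncated_functions
-- ===== SOURCE B (Python) =====
-- def truncate_functions(functions, max_length=28000):
--     """截断函数列表，确保总字符数不超过max_length"""
--     funcs = list(functions)
--     prefix = []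
--     run = 0
--     for f in funcs:
--         run += len(f) + 1
--         prefix.append(run)
--     cutoff = next((i for i, s in enumerate(prefix) if s > max_length), len(funcs))
--     return funcs[:cutoff]
-- ===== Notes on version B (the rewrite author's own statement) =====
-- stated objective: alternative
-- what changed: B precomputes the cumulative-length prefix sums in one pass, finds the first index whose prefix sum exceeds max_length, and returns a slice, instead of A's single loop that conditionally breaks and appends while maintaining a running total.
import Mathlib
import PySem

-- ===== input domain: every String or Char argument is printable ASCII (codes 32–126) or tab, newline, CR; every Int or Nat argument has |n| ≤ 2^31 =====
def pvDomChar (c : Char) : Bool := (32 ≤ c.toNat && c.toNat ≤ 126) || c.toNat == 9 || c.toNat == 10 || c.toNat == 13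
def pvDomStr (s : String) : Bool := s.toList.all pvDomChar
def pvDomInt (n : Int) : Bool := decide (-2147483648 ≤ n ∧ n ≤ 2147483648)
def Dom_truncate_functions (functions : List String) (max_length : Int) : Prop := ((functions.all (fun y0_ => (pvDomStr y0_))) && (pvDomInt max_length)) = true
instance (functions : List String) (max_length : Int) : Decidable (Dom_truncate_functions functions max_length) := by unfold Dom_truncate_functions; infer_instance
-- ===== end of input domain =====

-- B replaces A's break-and-append loop by a prefix-sum pass plus first-exceeding-index slice (alternative decomposition, same cost).
-- ===== PORT A =====
-- loop with running total, conditional break, and an accumulator list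
def truncateLoop (functions : List String) (max_length : Int) (total : Int) : List String :=
  match functions with
  | [] => []
  | f :: rest =>
      if total + (PySem.Str.len f : Int) + 1 > max_length then []
      else f :: truncateLoop rest max_length (total + (PySem.Str.len f : Int) + 1)

def truncate_functions (functions : List String) (max_length : Int) : List String :=
  truncateLoop functions max_length 0

-- ===== PORT B =====
-- pass 1 of Source B: cumulative sums run += len(f)+1, appended to prefix
def prefixSums (functions : List String) (run : Int) : List Int :=
  match functions with
  | [] => []
  | f :: rest => (run + (PySem.Str.len f : Int) + 1) :: prefixSums rest (run + (PySem.Str.len f : Int) + 1)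

-- Source B's next((i for i,s in enumerate(prefix) if s > max_length), len(funcs)): first index with s > max_length, default length
def firstExceed (ps : List Int) (max_length : Int) : Nat :=
  match ps with
  | [] => 0
  | s :: rest => if s > max_length then 0 else 1 + firstExceed rest max_length

def truncate_functions_alt (functions : List String) (max_length : Int) : List String :=
  functions.take (firstExceed (prefixSums functions 0) max_length)

-- ===== PRECONDITION & SPEC =====
def Spec_truncate_functions (functions : List String) (max_length : Int) (out : List String) : Prop := out = truncate_functions_alt functions max_length
instance (functions : List String) (max_length : Int) (out : List String) : Decidable (Spec_truncate_functions functions max_length out) := by unfold Spec_truncate_functions; infer_instance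

-- ===== CLAIM (what is proved, stated in full; the proofs are below) =====
def Claim_equal_truncate_functions : Prop := ∀ (functions : List String) (max_length : Int), Dom_truncate_functions functions max_length → Spec_truncate_functions functions max_length (truncate_functions functions max_length)

-- ===== LEMMAS AND PROOFS =====

-- ===== VERDICT (by name: the statement is the Claim_ definition above) =====
lemma truncateLoop_eq_take (functions : List String) (max_length total : Int) :
    truncateLoop functions max_length total
      = functions.take (firstExceed (prefixSums functions total) max_length) := by
  induction functions generalizing total with
  | nil => simp [truncateLoop, prefixSums, firstExceed]
  | cons f rest ih =>
      simp only [truncateLoop, prefixSums, firstExceed]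
      split_ifs with h
      · simp
      · rw [Nat.add_comm 1]; simp [ih]

-- ===== VERDICT (by name: the statement is the Claim_ definition above) =====
theorem truncate_functions_spec : Claim_equal_truncate_functions := by
  intro functions max_length _
  unfold Spec_truncate_functions truncate_functions truncate_functions_alt
  exact truncateLoop_eq_take functions max_length 0
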